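-- pv_equiv track=rewrite | github.com/HIBP/astrares | examples/astrares.py | get_const_names
-- ===== SOURCE A (Python) =====
-- def get_const_names(str_list):
--     result = []
--     section = 0
--     for s in str_list:
--         if s.lower().find('constants:') > -1:
--             section += 1
--         elif (section == 1)and(s.find('=') == -1):
--             section += 1
--         elif section == 1:
--             cname = s.split('=')[0]
--             cname = cname.strip()
--             result.append(cname)
--
--     return result
-- ===== SOURCE B (Python) =====
-- def get_const_names(str_list):
--     hdrs = [i for i, s in enumerate(str_list) if 'constants:' in s.lower()]
--     if not hdrs:
--         return []
--     body = str_list[hdrs[0] + 1:]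
--     stops = [j for j, s in enumerate(body) if 'constants:' in s.lower() or '=' not in s]
--     section = body[:stops[0]] if stops else body
--     return [s.split('=')[0].strip() for s in section]
-- ===== Notes on version B (the rewrite author's own statement) =====
-- stated objective: alternative
-- what changed: Replaced A's single stateful scan with a 'section' counter by a declarative pipeline of whole-list comprehensions and slices: build the list of header-line indices, slice the body after the first one, build the list of terminator indices, slice the section before the first one, then map split/strip over it; no per-line state is carried.
import Mathlib
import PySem

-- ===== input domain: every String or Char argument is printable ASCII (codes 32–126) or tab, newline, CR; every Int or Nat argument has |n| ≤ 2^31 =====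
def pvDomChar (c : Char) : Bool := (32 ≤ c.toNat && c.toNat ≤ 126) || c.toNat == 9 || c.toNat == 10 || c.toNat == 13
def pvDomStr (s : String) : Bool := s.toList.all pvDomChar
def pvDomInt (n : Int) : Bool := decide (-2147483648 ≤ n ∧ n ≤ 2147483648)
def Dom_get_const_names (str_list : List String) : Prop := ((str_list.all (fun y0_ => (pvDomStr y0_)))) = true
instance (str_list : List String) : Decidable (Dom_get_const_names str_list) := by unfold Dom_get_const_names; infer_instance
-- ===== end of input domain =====

-- B replaces A's single stateful scan (numeric 'section' counter) by a declarative pipeline of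
-- whole-list comprehensions and slices (header indices, body slice, terminator indices, section slice, map);
-- alternative decomposition, same cost.

-- ===== PORT A =====
-- A's state-machine loop: state = (result, section)
def pvA_go : List String → List String → Int → List String
  | [], result, _ => result
  | s :: rest, result, sec =>
    if PySem.Str.find (PySem.Str.lower s) "constants:" > -1 then
      pvA_go rest result (sec + 1)
    else if sec == 1 && (PySem.Str.find s "=" == -1) then
      pvA_go rest result (sec + 1)
    else if sec == 1 then
      pvA_go rest (result ++ [PySem.Str.strip (((PySem.Str.split? s "=").getD []).headD "")]) sec
    else
      pvA_go rest result sec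

def get_const_names (str_list : List String) : List String := pvA_go str_list [] 0

-- ===== PORT B =====
-- Source B: hdrs / body / stops / section comprehension-and-slice pipeline, transliterated
def get_const_names_alt (str_list : List String) : List String :=
  let hdrs := ((PySem.List.enumerate str_list).filter
      (fun p => PySem.Str.isIn "constants:" (PySem.Str.lower p.2))).map (·.1)
  match hdrs with
  | [] => []
  | i :: _ =>
    let body := PySem.List.slice str_list (some (i + 1)) none
    let stops := ((PySem.List.enumerate body).filter
        (fun p => PySem.Str.isIn "constants:" (PySem.Str.lower p.2) || !PySem.Str.isIn "=" p.2)).map (·.1)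
    let sect := match stops with
      | j :: _ => PySem.List.slice body none (some j)
      | [] => body
    sect.map (fun s => PySem.Str.strip (((PySem.Str.split? s "=").getD []).headD ""))

-- ===== PRECONDITION & SPEC =====
def Spec_get_const_names (str_list : List String) (out : List String) : Prop := out = get_const_names_alt str_list
instance (str_list : List String) (out : List String) : Decidable (Spec_get_const_names str_list out) := by unfold Spec_get_const_names; infer_instance

-- ===== CLAIM =====
def Claim_equal_get_const_names : Prop := ∀ (str_list : List String), Dom_get_const_names str_list → Spec_get_const_names str_list (get_const_names str_list)

-- ===== LEMMAS AND PROOFS =====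

-- proof-side abbreviations
def pvHdr (s : String) : Bool := PySem.Str.isIn "constants:" (PySem.Str.lower s)
def pvStop (s : String) : Bool := pvHdr s || !PySem.Str.isIn "=" s
def pvName (s : String) : String := PySem.Str.strip (((PySem.Str.split? s "=").getD []).headD "")

-- A's "find(sub) > -1" test is the "sub in s" test
lemma find_gt_iff_isIn (s sub : String) :
    PySem.Str.find s sub > -1 ↔ PySem.Str.isIn sub s = true := by
  have h := PySem.Chars.neg_one_le_find s.toList sub.toList
  rw [PySem.Str.isIn_iff_infix]
  constructor
  · intro hgt
    by_contra hni
    rw [← PySem.Str.find_eq_neg_one_iff] at hni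
    simp only [PySem.Str.find_eq] at hni hgt
    omega
  · intro hin
    have hne : ¬ PySem.Str.find s sub = -1 := by
      rw [PySem.Str.find_eq_neg_one_iff]; exact not_not_intro hin
    simp only [PySem.Str.find_eq] at hne ⊢
    omega

-- A's "find('=') == -1" test is "'=' not in s"
lemma find_beq_neg_one_eq_not_isIn (s sub : String) :
    (PySem.Str.find s sub == -1) = !PySem.Str.isIn sub s := by
  have h := find_gt_iff_isIn s sub
  have h2 := PySem.Chars.neg_one_le_find s.toList sub.toList
  simp only [PySem.Str.find_eq] at h ⊢
  cases hb : PySem.Str.isIn sub s <;> rw [hb] at h <;> simp at h ⊢ <;> omega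

-- once section ≥ 2, A appends nothing more
lemma pvA_go_stopped (l : List String) : ∀ (res : List String) (sec : Int), 2 ≤ sec →
    pvA_go l res sec = res := by
  induction l with
  | nil => intro res sec _; rfl
  | cons s rest ih =>
    intro res sec h
    simp only [pvA_go]
    split_ifs with h1 h2 h3
    · exact ih res (sec + 1) (by omega)
    · exact ih res (sec + 1) (by omega)
    · simp at h3; omega
    · exact ih res sec h

-- in section 1, A collects names of the maximal stop-free prefix
lemma pvA_go_one (l : List String) : ∀ (res : List String),
    pvA_go l res 1 = res ++ (l.takeWhile (fun s => !pvStop s)).map pvName := by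
  induction l with
  | nil => intro res; simp [pvA_go]
  | cons s rest ih =>
    intro res
    simp only [pvA_go]
    cases hc : PySem.Str.isIn "constants:" (PySem.Str.lower s) with
    | true =>
      have hstop : pvStop s = true := by simp only [pvStop, pvHdr]; rw [hc]; rfl
      rw [if_pos ((find_gt_iff_isIn _ _).mpr hc), pvA_go_stopped _ _ _ (by omega),
        List.takeWhile_cons, if_neg (by simp [hstop])]
      simp
    | false =>
      rw [if_neg (fun hgt => by
        rw [(find_gt_iff_isIn _ _).mp hgt] at hc; exact Bool.noConfusion hc)]
      cases he : PySem.Str.isIn "=" s with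
      | true =>
        have hstop : pvStop s = false := by simp only [pvStop, pvHdr]; rw [hc, he]; rfl
        rw [if_neg (by rw [find_beq_neg_one_eq_not_isIn, he]; simp),
          if_pos (by decide), ih, List.takeWhile_cons, if_pos (by simp [hstop])]
        simp [pvName, List.headD_eq_head?_getD]
      | false =>
        have hstop : pvStop s = true := by simp only [pvStop, pvHdr]; rw [hc, he]; rfl
        rw [if_pos (by rw [find_beq_neg_one_eq_not_isIn, he]; simp),
          pvA_go_stopped _ _ _ (by omega), List.takeWhile_cons, if_neg (by simp [hstop])]
        simp

-- in section 0, A drops everything up to and including the first header line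
lemma pvA_go_zero (l : List String) : ∀ (res : List String),
    pvA_go l res 0 = res ++ (match List.findIdx? pvHdr l with
      | none => []
      | some j => ((l.drop (j + 1)).takeWhile (fun s => !pvStop s)).map pvName) := by
  induction l with
  | nil => intro res; simp [pvA_go]
  | cons s rest ih =>
    intro res
    simp only [pvA_go]
    cases hc : PySem.Str.isIn "constants:" (PySem.Str.lower s) with
    | true =>
      rw [if_pos ((find_gt_iff_isIn _ _).mpr hc)]
      rw [List.findIdx?_cons, if_pos (by simpa [pvHdr] using hc)]
      simpa using pvA_go_one rest res
    | false =>
      rw [if_neg (fun hgt => by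
        rw [(find_gt_iff_isIn _ _).mp hgt] at hc; exact Bool.noConfusion hc),
        if_neg (by rw [show ((0:Int) == 1) = false from by decide]; simp),
        if_neg (by decide), ih]
      rw [List.findIdx?_cons, if_neg (by simp only [pvHdr]; rw [hc]; simp)]
      cases List.findIdx? pvHdr rest <;> simp

-- head of the index comprehension = findIdx?, shifted by the enumerate offset
lemma filter_enum_head (P : String → Bool) (l : List String) : ∀ (k : Int),
    ((((PySem.List.enumerate l k).filter (fun p => P p.2)).map (·.1))).head? =
      (List.findIdx? P l).map (fun j : Nat => k + (j : Int)) := by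
  induction l with
  | nil => intro k; simp [PySem.List.enumerate_nil]
  | cons s rest ih =>
    intro k
    rw [PySem.List.enumerate_cons, List.findIdx?_cons]
    cases hP : P s with
    | true => simp [hP]
    | false =>
      simp only [List.filter_cons, hP, if_neg, Bool.false_eq_true, not_false_iff, ih (k + 1)]
      cases List.findIdx? P rest with
      | none => simp
      | some j => simp; ring

-- generic: when p first holds at index m, the ¬p-prefix is take m
lemma takeWhile_eq_take_of_findIdx? {a : Type} (p : a → Bool) :
    ∀ (l : List a) (m : Nat), List.findIdx? p l = some m →
      l.takeWhile (fun x => !p x) = l.take m := by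
  intro l
  induction l with
  | nil => intro m h; simp at h
  | cons x xs ih =>
    intro m h
    rw [List.findIdx?_cons] at h
    cases hp : p x with
    | true =>
      rw [if_pos hp] at h
      simp at h
      simp [List.takeWhile, hp, ← h]
    | false =>
      rw [if_neg (by simp [hp])] at h
      cases hg : List.findIdx? p xs with
      | none => rw [hg] at h; simp at h
      | some m' =>
        rw [hg] at h
        simp at h
        simp [List.takeWhile, hp, ih m' hg, ← h]

-- generic: when p never holds, the ¬p-prefix is the whole list
lemma takeWhile_eq_self_of_findIdx?_none {a : Type} (p : a → Bool) :
    ∀ (l : List a), List.findIdx? p l = none → l.takeWhile (fun x => !p x) = l := by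
  intro l
  induction l with
  | nil => intro _; rfl
  | cons x xs ih =>
    intro h
    rw [List.findIdx?_cons] at h
    cases hp : p x with
    | true => rw [if_pos hp] at h; simp at h
    | false =>
      rw [if_neg (by simp [hp])] at h
      cases hg : List.findIdx? p xs with
      | none => simp [List.takeWhile, hp, ih hg]
      | some m' => rw [hg] at h; simp at h

-- B's pipeline, rewritten through findIdx? / drop / takeWhile
lemma alt_eq (l : List String) :
    get_const_names_alt l = (match List.findIdx? pvHdr l with
      | none => []
      | some j => ((l.drop (j + 1)).takeWhile (fun s => !pvStop s)).map pvName) := by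
  unfold get_const_names_alt
  rw [show (fun p : Int × String => PySem.Str.isIn "constants:" (PySem.Str.lower p.2))
        = (fun p => pvHdr p.2) from rfl,
     show (fun p : Int × String =>
            PySem.Str.isIn "constants:" (PySem.Str.lower p.2) || !PySem.Str.isIn "=" p.2)
        = (fun p => pvStop p.2) from rfl,
     show (fun s => PySem.Str.strip (((PySem.Str.split? s "=").getD []).headD ""))
        = pvName from rfl]
  dsimp only
  have h1 := filter_enum_head pvHdr l 0
  cases hf : List.findIdx? pvHdr l with
  | none =>
    rw [hf, Option.map_none] at h1
    have h1' : (((PySem.List.enumerate l 0).filter (fun p => pvHdr p.2)).map (·.1)) = [] :=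
      List.head?_eq_none_iff.mp h1
    rw [h1']
  | some j =>
    rw [hf, Option.map_some] at h1
    obtain ⟨tl, htl⟩ : ∃ tl,
        (((PySem.List.enumerate l 0).filter (fun p => pvHdr p.2)).map (·.1))
          = ((j : Int)) :: tl := by
      rcases hh : (((PySem.List.enumerate l 0).filter (fun p => pvHdr p.2)).map (·.1)) with _ | ⟨a, tl⟩
      · rw [hh] at h1; exact absurd h1 (by simp)
      · rw [hh] at h1; simp at h1; exact ⟨tl, by rw [hh, h1]⟩
    rw [htl]
    dsimp only
    have hslice : PySem.List.slice l (some ((j : Int) + 1)) none = l.drop (j + 1) := by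
      rw [show ((j : Int) + 1) = (((j + 1 : Nat) : Int)) by push_cast; ring]
      exact PySem.List.slice_from_natCast l (j + 1)
    rw [hslice]
    have h2 := filter_enum_head pvStop (l.drop (j + 1)) 0
    cases hg : List.findIdx? pvStop (l.drop (j + 1)) with
    | none =>
      rw [hg, Option.map_none] at h2
      have h2' : (((PySem.List.enumerate (l.drop (j + 1)) 0).filter (fun p => pvStop p.2)).map (·.1)) = [] :=
        List.head?_eq_none_iff.mp h2
      rw [h2', takeWhile_eq_self_of_findIdx?_none pvStop _ hg]
    | some m =>
      rw [hg, Option.map_some] at h2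
      obtain ⟨tl2, htl2⟩ : ∃ tl2,
          (((PySem.List.enumerate (l.drop (j + 1)) 0).filter (fun p => pvStop p.2)).map (·.1))
            = ((m : Int)) :: tl2 := by
        rcases hh : (((PySem.List.enumerate (l.drop (j + 1)) 0).filter (fun p => pvStop p.2)).map (·.1)) with _ | ⟨a, tl2⟩
        · rw [hh] at h2; exact absurd h2 (by simp)
        · rw [hh] at h2; simp at h2; exact ⟨tl2, by rw [hh, h2]⟩
      rw [htl2]
      dsimp only
      rw [PySem.List.slice_to_natCast,
        takeWhile_eq_take_of_findIdx? pvStop _ m hg]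

-- ===== VERDICT =====
theorem get_const_names_spec : Claim_equal_get_const_names := by
  intro l _
  show get_const_names l = get_const_names_alt l
  rw [alt_eq]
  unfold get_const_names
  simpa using pvA_go_zero l []
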